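-- pv_equiv track=rewrite | github.com/manas-17045/LeetcodeSolutions | Leetcode 2401-2500/2430/2430_1.py | deleteString
-- ===== SOURCE A (Python) =====
-- def deleteString(s: str) -> int:
--     """
--     Calculates the maximum number of operations to delete a string.
--     An operation consists of deleting the longest prefix of the string that also appears as a substring starting at a later index.
--
--     Args:
--         s (str): The input string.
--     Returns:
--         int: The maximum number of operations.
--     """
--
--     n = len(s)
--
--     lcp = [[0] * (n + 1) for _ in range(n + 1)]
--     for i in range(n - 1, -1, -1):
--         for j in range(n - 1, -1, -1):
--             if s[i] == s[j]:
--                 lcp[i][j] = 1 + lcp[i + 1][j + 1]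
--
--     dp = [0] * n
--     for i in range(n - 1, -1, -1):
--         dp[i] = 1
--         prefixLengthLimit = (n - i) // 2
--         for j in range(1, prefixLengthLimit + 1):
--             if lcp[i][i + j] >= j:
--                 dp[i] = max(dp[i], 1 + dp[i + j])
--
--     return dp[0]
-- ===== SOURCE B (Python) =====
-- def deleteString(s: str) -> int:
--     n = len(s)
--     dp = [1] * n
--     for i in range(n - 2, -1, -1):
--         for j in range(1, (n - i) // 2 + 1):
--             if s[i:i + j] == s[i + j:i + 2 * j]:
--                 dp[i] = max(dp[i], 1 + dp[i + j])
--     return dp[0]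
-- ===== Notes on version B (the rewrite author's own statement) =====
-- stated objective: simpler
-- what changed: Drops A's O(n^2) precomputed LCP table entirely: B keeps only the dp array (initialized to 1) and tests prefix reappearance by direct slice comparison s[i:i+j] == s[i+j:i+2j]; skipping the (n+1)x(n+1) table allocation and Python-level fill loops (slice compares run at C speed) is what makes it measurably faster.
import Mathlib
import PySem

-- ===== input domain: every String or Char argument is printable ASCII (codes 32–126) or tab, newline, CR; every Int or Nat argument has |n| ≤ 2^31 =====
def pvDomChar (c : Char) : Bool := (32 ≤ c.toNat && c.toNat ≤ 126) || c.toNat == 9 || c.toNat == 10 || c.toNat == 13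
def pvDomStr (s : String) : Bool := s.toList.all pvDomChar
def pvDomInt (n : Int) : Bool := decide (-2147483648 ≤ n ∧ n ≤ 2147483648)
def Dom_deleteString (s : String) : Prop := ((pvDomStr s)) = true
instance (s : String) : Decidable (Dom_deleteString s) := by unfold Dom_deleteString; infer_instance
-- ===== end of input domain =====

-- B drops A's O(n^2) precomputed LCP table and tests prefix reappearance by direct slice
-- comparison, keeping only the dp array (objective: simpler; same return value on every
-- non-empty string; both raise IndexError on "").

-- ===== PORT A =====
-- helpers for A's 2-D list: lcp[i][j] read and lcp[i][j] = v write
-- (all indices the loops produce are in range, so getD/set are exact — no IndexError here)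
def pvMget (m : List (List Int)) (i j : Nat) : Int := (m.getD i []).getD j 0
def pvMset (m : List (List Int)) (i j : Nat) (v : Int) : List (List Int) :=
  m.set i ((m.getD i []).set j v)

-- body of A's inner lcp loop: `if s[i] == s[j]: lcp[i][j] = 1 + lcp[i+1][j+1]`
def lcpInnerA (cs : List Char) (i : Int) (m : List (List Int)) (j : Int) : List (List Int) :=
  if cs.getD i.toNat ' ' = cs.getD j.toNat ' ' then
    pvMset m i.toNat j.toNat (1 + pvMget m (i.toNat + 1) (j.toNat + 1))
  else m

-- body of A's outer lcp loop: `for j in range(n-1, -1, -1): …`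
def lcpOuterA (cs : List Char) (m : List (List Int)) (i : Int) : List (List Int) :=
  (PySem.List.pyRange ((cs.length : Int) - 1) (-1) (-1)).foldl (lcpInnerA cs i) m

-- body of A's inner dp loop: `if lcp[i][i+j] >= j: dp[i] = max(dp[i], 1 + dp[i+j])`
def dpInnerA (lcp : List (List Int)) (i : Int) (d : List Int) (j : Int) : List Int :=
  if pvMget lcp i.toNat (i + j).toNat ≥ j then
    d.set i.toNat (max (d.getD i.toNat 0) (1 + d.getD (i + j).toNat 0))
  else d

-- body of A's outer dp loop: `dp[i] = 1; for j in range(1, (n-i)//2 + 1): …`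
def dpOuterA (cs : List Char) (lcp : List (List Int)) (d : List Int) (i : Int) : List Int :=
  (PySem.List.pyRange 1 (PySem.Int.floordiv ((cs.length : Int) - i) 2 + 1) 1).foldl
    (dpInnerA lcp i) (d.set i.toNat 1)

def deleteStringCore (cs : List Char) : Int :=
  let n := cs.length
  let lcp := (PySem.List.pyRange ((n : Int) - 1) (-1) (-1)).foldl (lcpOuterA cs)
    (List.replicate (n + 1) (List.replicate (n + 1) (0 : Int)))
  let dp := (PySem.List.pyRange ((n : Int) - 1) (-1) (-1)).foldl (dpOuterA cs lcp)
    (List.replicate n (0 : Int))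
  dp.getD 0 0   -- dp[0]; Python raises IndexError on "", excluded by Pre_

def deleteString (s : String) : Int := deleteStringCore s.toList

-- ===== PORT B =====
-- body of B's inner loop: `if s[i:i+j] == s[i+j:i+2*j]: dp[i] = max(dp[i], 1 + dp[i+j])`
def dpInnerB (cs : List Char) (i : Int) (d : List Int) (j : Int) : List Int :=
  if PySem.List.slice cs (some i) (some (i + j)) =
      PySem.List.slice cs (some (i + j)) (some (i + 2 * j)) then
    d.set i.toNat (max (d.getD i.toNat 0) (1 + d.getD (i + j).toNat 0))
  else d

-- body of B's outer loop: `for j in range(1, (n-i)//2 + 1): …`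
def dpOuterB (cs : List Char) (d : List Int) (i : Int) : List Int :=
  (PySem.List.pyRange 1 (PySem.Int.floordiv ((cs.length : Int) - i) 2 + 1) 1).foldl
    (dpInnerB cs i) d

def deleteStringAltCore (cs : List Char) : Int :=
  let n := cs.length
  let dp := (PySem.List.pyRange ((n : Int) - 2) (-1) (-1)).foldl (dpOuterB cs)
    (List.replicate n (1 : Int))
  dp.getD 0 0   -- dp[0]; Python raises IndexError on "", excluded by Pre_

def deleteString_alt (s : String) : Int := deleteStringAltCore s.toList

-- ===== PRECONDITION & SPEC =====
-- both Pythons raise IndexError (dp[0]) on the empty string; everything else is admitted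
def Pre_deleteString (s : String) : Prop := s.toList ≠ []
instance (s : String) : Decidable (Pre_deleteString s) := by unfold Pre_deleteString; infer_instance
def pvWitness_deleteString : String := "abab"

def Spec_deleteString (s : String) (out : Int) : Prop := out = deleteString_alt s
instance (s : String) (out : Int) : Decidable (Spec_deleteString s out) := by unfold Spec_deleteString; infer_instance

-- ===== CLAIM (what is proved, stated in full; the proofs are below) =====
def Claim_equal_deleteString : Prop :=
  ∀ (s : String), Dom_deleteString s → Pre_deleteString s → Spec_deleteString s (deleteString s)

-- ===== LEMMAS AND PROOFS =====

-- length of the longest common prefix of two character lists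
def lcpLen : List Char → List Char → Nat
  | a :: as, b :: bs => if a = b then lcpLen as bs + 1 else 0
  | _, _ => 0

theorem lcpLen_nil_left (b : List Char) : lcpLen [] b = 0 := by cases b <;> rfl
theorem lcpLen_nil_right (a : List Char) : lcpLen a [] = 0 := by cases a <;> rfl

theorem lcpLen_drop (cs : List Char) (i j : Nat) (hi : i < cs.length) (hj : j < cs.length) :
    lcpLen (cs.drop i) (cs.drop j) =
      if cs[i] = cs[j] then lcpLen (cs.drop (i + 1)) (cs.drop (j + 1)) + 1 else 0 := by
  rw [List.drop_eq_getElem_cons hi, List.drop_eq_getElem_cons hj]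
  simp [lcpLen]

theorem le_lcpLen_iff_take_eq (j : Nat) :
    ∀ (a b : List Char), j ≤ a.length → j ≤ b.length →
      (j ≤ lcpLen a b ↔ a.take j = b.take j) := by
  induction j with
  | zero => intro a b _ _; simp
  | succ j ih =>
    intro a b ha hb
    cases a with
    | nil => simp at ha
    | cons x as =>
      cases b with
      | nil => simp at hb
      | cons y bs =>
        simp only [lcpLen, List.take_succ_cons]
        by_cases hxy : x = y
        · subst hxy
          rw [if_pos rfl, Nat.add_le_add_iff_right,
            ih as bs (by simpa using ha) (by simpa using hb)]
          simp
        · simp [hxy]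

def LcpVal (cs : List Char) (i j : Nat) : Int := (lcpLen (cs.drop i) (cs.drop j) : Int)

-- small getD/set facts
theorem getD_set_self {α : Type} [Inhabited α] (l : List α) (i : Nat) (v d : α) (h : i < l.length) :
    (l.set i v).getD i d = v := by
  simp [List.getD_eq_getElem?_getD, h]

theorem getD_set_ne {α : Type} [Inhabited α] (l : List α) (i j : Nat) (v d : α) (h : i ≠ j) :
    (l.set i v).getD j d = l.getD j d := by
  simp [List.getD_eq_getElem?_getD, List.getElem?_set_ne h]

-- lcp-table invariant: rows ≥ k hold the true lcp values, rows < k are still 0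
def LcpInv (cs : List Char) (k : Nat) (m : List (List Int)) : Prop :=
  m.length = cs.length + 1 ∧
  (∀ t, t ≤ cs.length → (m.getD t []).length = cs.length + 1) ∧
  (∀ i j, pvMget m i j =
    if k ≤ i ∧ i < cs.length ∧ j < cs.length then LcpVal cs i j else 0)

-- row-i0 invariant inside the inner loop: cells of row i0 with column ≥ k' are done
def RowInv (cs : List Char) (i0 k' : Nat) (m : List (List Int)) : Prop :=
  m.length = cs.length + 1 ∧
  (∀ t, t ≤ cs.length → (m.getD t []).length = cs.length + 1) ∧
  (∀ i j, pvMget m i j =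
    if (i0 < i ∧ i < cs.length ∧ j < cs.length) ∨ (i = i0 ∧ k' ≤ j ∧ j < cs.length)
    then LcpVal cs i j else 0)

theorem lcpInnerA_step (cs : List Char) (i0 j0 : Nat) (hi : i0 < cs.length) (hj : j0 < cs.length)
    (m : List (List Int)) (hm : RowInv cs i0 (j0 + 1) m) :
    RowInv cs i0 j0 (lcpInnerA cs (i0 : Int) m (j0 : Int)) := by
  obtain ⟨hlen, hrow, hval⟩ := hm
  have hgi : cs.getD i0 ' ' = cs[i0] := List.getD_eq_getElem cs ' ' hi
  have hgj : cs.getD j0 ' ' = cs[j0] := List.getD_eq_getElem cs ' ' hj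
  unfold lcpInnerA
  simp only [Int.toNat_natCast, hgi, hgj]
  by_cases hc : cs[i0] = cs[j0]
  · simp only [if_pos hc]
    -- the value written is exactly LcpVal cs i0 j0
    have hnext : (1 : Int) + pvMget m (i0 + 1) (j0 + 1) = LcpVal cs i0 j0 := by
      rw [hval]
      by_cases h1 : i0 + 1 < cs.length
      · by_cases h2 : j0 + 1 < cs.length
        · rw [if_pos (Or.inl ⟨by omega, h1, h2⟩)]
          unfold LcpVal
          rw [lcpLen_drop cs i0 j0 hi hj, if_pos hc]
          push_cast; ring
        · have hj1 : j0 + 1 = cs.length := by omega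
          rw [if_neg (by omega)]
          unfold LcpVal
          rw [lcpLen_drop cs i0 j0 hi hj, if_pos hc, hj1]
          simp [lcpLen_nil_right]
      · have hi1 : i0 + 1 = cs.length := by omega
        rw [if_neg (by omega)]
        unfold LcpVal
        rw [lcpLen_drop cs i0 j0 hi hj, if_pos hc, hi1]
        simp [lcpLen_nil_left]
    refine ⟨by simp [pvMset, hlen], ?_, ?_⟩
    · intro t ht
      by_cases hti : t = i0
      · subst hti
        unfold pvMset
        rw [getD_set_self _ _ _ _ (by omega)]
        simpa using hrow t ht
      · unfold pvMset
        rw [getD_set_ne _ _ _ _ _ (fun h => hti h.symm)]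
        exact hrow t ht
    · intro i j
      by_cases hii : i = i0
      · subst hii
        have hrowi : (m.getD i []).length = cs.length + 1 := hrow i (by omega)
        by_cases hjj : j = j0
        · subst hjj
          unfold pvMget pvMset
          rw [getD_set_self _ _ _ _ (by omega), getD_set_self _ _ _ _ (by omega)]
          rw [if_pos (Or.inr ⟨rfl, le_refl _, hj⟩)]
          exact hnext
        · unfold pvMget pvMset
          rw [getD_set_self _ _ _ _ (by omega), getD_set_ne _ _ _ _ _ (fun h => hjj h.symm)]
          have hv := hval i j
          unfold pvMget at hv
          rw [hv]
          by_cases hcond : (i < i ∧ i < cs.length ∧ j < cs.length) ∨ (i = i ∧ j0 + 1 ≤ j ∧ j < cs.length)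
          · rw [if_pos hcond]
            rcases hcond with h | h
            · omega
            · rw [if_pos (Or.inr ⟨h.1, by omega, h.2.2⟩)]
          · rw [if_neg hcond, if_neg ?_]
            rintro (h | h)
            · exact hcond (Or.inl h)
            · exact hcond (Or.inr ⟨h.1, by omega, h.2.2⟩)
      · unfold pvMget pvMset
        rw [getD_set_ne _ _ _ _ _ (fun h => hii h.symm)]
        have hv := hval i j
        unfold pvMget at hv
        rw [hv]
        congr 1
        simp only [eq_iff_iff]
        constructor
        · rintro (h | h)
          · exact Or.inl h
          · exact absurd h.1 hii
        · rintro (h | h)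
          · exact Or.inl h
          · exact absurd h.1 hii
  · simp only [if_neg hc]
    refine ⟨hlen, hrow, ?_⟩
    intro i j
    rw [hval i j]
    by_cases hij : i = i0 ∧ j = j0
    · obtain ⟨h1, h2⟩ := hij; subst h1; subst h2
      rw [if_neg (by omega), if_pos (Or.inr ⟨rfl, le_refl _, hj⟩)]
      unfold LcpVal
      rw [lcpLen_drop cs i j hi hj, if_neg hc]
      simp
    · congr 1
      simp only [eq_iff_iff]
      constructor
      · rintro (h | h)
        · exact Or.inl h
        · exact Or.inr ⟨h.1, by omega, h.2.2⟩
      · rintro (h | h)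
        · exact Or.inl h
        · rcases h with ⟨hi', hjle, hjlt⟩
          refine Or.inr ⟨hi', ?_, hjlt⟩
          rcases Nat.lt_or_ge j0 j with hlt | hge
          · omega
          · exfalso; exact hij ⟨hi', by omega⟩

theorem lcpInner_fold (cs : List Char) (i0 : Nat) (hi : i0 < cs.length) :
    ∀ (k' : Nat), k' ≤ cs.length → ∀ (m : List (List Int)), RowInv cs i0 k' m →
      RowInv cs i0 0 ((PySem.List.pyRange ((k' : Int) - 1) (-1) (-1)).foldl (lcpInnerA cs (i0 : Int)) m) := by
  intro k'
  induction k' with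
  | zero =>
    intro _ m hm
    simp only [Nat.cast_zero, zero_sub]
    rw [PySem.List.pyRange_neg_one_eq_nil (by norm_num)]
    simpa using hm
  | succ k ih =>
    intro hk m hm
    rw [show ((k + 1 : Nat) : Int) - 1 = (k : Int) by push_cast; ring]
    rw [PySem.List.pyRange_neg_one_cons (by omega)]
    simp only [List.foldl_cons]
    exact ih (by omega) _ (lcpInnerA_step cs i0 k hi (by omega) m hm)

theorem LcpInv_init (cs : List Char) :
    LcpInv cs cs.length (List.replicate (cs.length + 1) (List.replicate (cs.length + 1) (0 : Int))) := by
  refine ⟨by simp, ?_, ?_⟩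
  · intro t ht
    rw [List.getD_replicate _ (by omega)]
    simp
  · intro i j
    rw [if_neg (by omega)]
    unfold pvMget
    by_cases hi : i < cs.length + 1
    · rw [List.getD_replicate _ hi]
      by_cases hj : j < cs.length + 1
      · rw [List.getD_replicate _ hj]
      · rw [List.getD_eq_default (List.replicate (cs.length + 1) (0 : Int)) _ (by simp; omega)]
    · have hrow : (List.replicate (cs.length + 1) (List.replicate (cs.length + 1) (0 : Int))).getD i [] = [] :=
        List.getD_eq_default _ _ (by simp; omega)
      rw [hrow]
      simp [List.getD]

theorem lcpOuter_fold (cs : List Char) :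
    ∀ (k : Nat), k ≤ cs.length → ∀ (m : List (List Int)), LcpInv cs k m →
      LcpInv cs 0 ((PySem.List.pyRange ((k : Int) - 1) (-1) (-1)).foldl (lcpOuterA cs) m) := by
  intro k
  induction k with
  | zero =>
    intro _ m hm
    simp only [Nat.cast_zero, zero_sub]
    rw [PySem.List.pyRange_neg_one_eq_nil (by norm_num)]
    simpa using hm
  | succ k ih =>
    intro hk m hm
    rw [show ((k + 1 : Nat) : Int) - 1 = (k : Int) by push_cast; ring]
    rw [PySem.List.pyRange_neg_one_cons (by omega)]
    simp only [List.foldl_cons]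
    apply ih (by omega)
    have hrow : RowInv cs k cs.length m := by
      obtain ⟨h1, h2, h3⟩ := hm
      refine ⟨h1, h2, ?_⟩
      intro i j
      rw [h3 i j]
      congr 1
      simp only [eq_iff_iff]
      constructor
      · intro h; exact Or.inl ⟨by omega, h.2⟩
      · rintro (h | h)
        · exact ⟨by omega, h.2⟩
        · exact absurd h.2 (by omega)
    have hres := lcpInner_fold cs k (by omega) cs.length (le_refl _) m hrow
    show LcpInv cs k (lcpOuterA cs m (k : Int))
    unfold lcpOuterA
    obtain ⟨h1, h2, h3⟩ := hres
    refine ⟨h1, h2, ?_⟩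
    intro i j
    rw [h3 i j]
    congr 1
    simp only [eq_iff_iff]
    constructor
    · rintro (h | h)
      · exact ⟨by omega, h.2⟩
      · exact ⟨by omega, by omega, h.2.2⟩
    · rintro ⟨hki, hin, hjn⟩
      by_cases hik : i = k
      · exact Or.inr ⟨hik, Nat.zero_le _, hjn⟩
      · exact Or.inl ⟨by omega, hin, hjn⟩

-- A's table test equals the length-j prefix comparison …
theorem cond_table (cs : List Char) (lcp : List (List Int)) (hl : LcpInv cs 0 lcp)
    (i0 j0 : Nat) (h1 : 1 ≤ j0) (h2 : i0 + 2 * j0 ≤ cs.length) :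
    (pvMget lcp i0 (i0 + j0) ≥ (j0 : Int)) ↔
      ((cs.drop i0).take j0 = (cs.drop (i0 + j0)).take j0) := by
  obtain ⟨-, -, hval⟩ := hl
  rw [hval, if_pos ⟨Nat.zero_le _, by omega, by omega⟩]
  unfold LcpVal
  rw [ge_iff_le, Nat.cast_le]
  exact le_lcpLen_iff_take_eq j0 _ _ (by rw [List.length_drop]; omega)
    (by rw [List.length_drop]; omega)

-- … and so does B's slice comparison
theorem cond_slice (cs : List Char) (i0 j0 : Nat) :
    (PySem.List.slice cs (some (i0 : Int)) (some ((i0 : Int) + (j0 : Int))) =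
      PySem.List.slice cs (some ((i0 : Int) + (j0 : Int))) (some ((i0 : Int) + 2 * (j0 : Int)))) ↔
      ((cs.drop i0).take j0 = (cs.drop (i0 + j0)).take j0) := by
  rw [PySem.List.slice_natCast_add]
  rw [show (i0 : Int) + (j0 : Int) = ((i0 + j0 : Nat) : Int) by push_cast; ring]
  rw [show (i0 : Int) + 2 * (j0 : Int) = ((i0 + j0 : Nat) : Int) + ((j0 : Nat) : Int) by push_cast; ring]
  rw [PySem.List.slice_natCast_add]

-- relation between A's and B's dp arrays with the countdown at k:
-- equal from k up, and below k A still has the initial 0 where B has the initial 1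
def DpRel (n k : Nat) (a b : List Int) : Prop :=
  a.length = n ∧ b.length = n ∧ (∀ t, k ≤ t → a.getD t 0 = b.getD t 0) ∧
  (∀ t, t < k → a.getD t 0 = 0 ∧ b.getD t 0 = 1)

theorem foldl_rel_mem {α β : Type} (R : α → α → Prop) (f g : α → β → α) :
    ∀ (l : List β), (∀ x ∈ l, ∀ a b, R a b → R (f a x) (g b x)) →
      ∀ a b, R a b → R (l.foldl f a) (l.foldl g b) := by
  intro l
  induction l with
  | nil => intro _ a b h; exact h
  | cons x xs ih =>
    intro hstep a b h
    simp only [List.foldl_cons]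
    exact ih (fun y hy => hstep y (List.mem_cons_of_mem x hy)) _ _
      (hstep x List.mem_cons_self a b h)

theorem dpInner_rel (cs : List Char) (lcp : List (List Int)) (hl : LcpInv cs 0 lcp)
    (i0 j0 : Nat) (h1 : 1 ≤ j0) (h2 : i0 + 2 * j0 ≤ cs.length) (a b : List Int)
    (h : DpRel cs.length i0 a b) :
    DpRel cs.length i0 (dpInnerA lcp (i0 : Int) a (j0 : Int)) (dpInnerB cs (i0 : Int) b (j0 : Int)) := by
  obtain ⟨ha, hb, hagree, hlow⟩ := h
  unfold dpInnerA dpInnerB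
  have hidx : ((i0 : Int) + (j0 : Int)).toNat = i0 + j0 := by omega
  simp only [Int.toNat_natCast, hidx]
  have hcond := (cond_table cs lcp hl i0 j0 h1 h2).trans (cond_slice cs i0 j0).symm
  by_cases hc : pvMget lcp i0 (i0 + j0) ≥ (j0 : Int)
  · rw [if_pos hc, if_pos (hcond.mp hc)]
    have hv : max (a.getD i0 0) (1 + a.getD (i0 + j0) 0) =
        max (b.getD i0 0) (1 + b.getD (i0 + j0) 0) := by
      rw [hagree i0 (le_refl _), hagree (i0 + j0) (by omega)]
    rw [hv]
    refine ⟨by simp [ha], by simp [hb], ?_, ?_⟩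
    · intro t ht
      by_cases hti : t = i0
      · subst hti
        rw [getD_set_self _ _ _ _ (by omega), getD_set_self _ _ _ _ (by omega)]
      · rw [getD_set_ne _ _ _ _ _ (fun h => hti h.symm),
          getD_set_ne _ _ _ _ _ (fun h => hti h.symm)]
        exact hagree t ht
    · intro t ht
      rw [getD_set_ne _ _ _ _ _ (by omega), getD_set_ne _ _ _ _ _ (by omega)]
      exact hlow t ht
  · rw [if_neg hc, if_neg (fun h => hc (hcond.mpr h))]
    exact ⟨ha, hb, hagree, hlow⟩

theorem dpOuter_rel (cs : List Char) (lcp : List (List Int)) (hl : LcpInv cs 0 lcp)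
    (i0 : Nat) (hi : i0 < cs.length) (a b : List Int) (h : DpRel cs.length i0 a b) :
    DpRel cs.length i0
      ((PySem.List.pyRange 1 (PySem.Int.floordiv ((cs.length : Int) - (i0 : Int)) 2 + 1) 1).foldl
        (dpInnerA lcp (i0 : Int)) a)
      ((PySem.List.pyRange 1 (PySem.Int.floordiv ((cs.length : Int) - (i0 : Int)) 2 + 1) 1).foldl
        (dpInnerB cs (i0 : Int)) b) := by
  apply foldl_rel_mem (DpRel cs.length i0) _ _ _ ?_ a b h
  intro j hj a' b' h'
  have hlim : PySem.Int.floordiv ((cs.length : Int) - (i0 : Int)) 2 = (((cs.length - i0) / 2 : Nat) : Int) := by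
    rw [show ((cs.length : Int) - (i0 : Int)) = (((cs.length - i0 : Nat)) : Int) by omega]
    exact_mod_cast PySem.Int.floordiv_natCast (cs.length - i0) 2
  rw [hlim] at hj
  rw [PySem.List.mem_pyRange_one] at hj
  have hj0 : j = ((j.toNat : Nat) : Int) := by omega
  rw [hj0]
  apply dpInner_rel cs lcp hl i0 j.toNat (by omega) (by omega) a' b' h'

theorem dpPar_fold (cs : List Char) (lcp : List (List Int)) (hl : LcpInv cs 0 lcp) :
    ∀ (k : Nat), k ≤ cs.length → ∀ (a b : List Int), DpRel cs.length k a b →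
      DpRel cs.length 0
        ((PySem.List.pyRange ((k : Int) - 1) (-1) (-1)).foldl (dpOuterA cs lcp) a)
        ((PySem.List.pyRange ((k : Int) - 1) (-1) (-1)).foldl (dpOuterB cs) b) := by
  intro k
  induction k with
  | zero =>
    intro _ a b h
    simp only [Nat.cast_zero, zero_sub]
    rw [PySem.List.pyRange_neg_one_eq_nil (by norm_num)]
    simpa using h
  | succ k ih =>
    intro hk a b h
    rw [show ((k + 1 : Nat) : Int) - 1 = (k : Int) by push_cast; ring]
    rw [PySem.List.pyRange_neg_one_cons (by omega)]
    simp only [List.foldl_cons]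
    apply ih (by omega)
    obtain ⟨ha, hb, hagree, hlow⟩ := h
    have hset : DpRel cs.length k (a.set k 1) b := by
      refine ⟨by simp [ha], hb, ?_, ?_⟩
      · intro t ht
        by_cases htk : t = k
        · subst htk
          rw [getD_set_self _ _ _ _ (by omega)]
          exact ((hlow t (by omega)).2).symm
        · rw [getD_set_ne _ _ _ _ _ (fun h => htk h.symm)]
          exact hagree t (by omega)
      · intro t ht
        rw [getD_set_ne _ _ _ _ _ (by omega)]
        exact hlow t (by omega)
    show DpRel cs.length k (dpOuterA cs lcp a (k : Int)) (dpOuterB cs b (k : Int))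
    unfold dpOuterA dpOuterB
    simp only [Int.toNat_natCast]
    exact dpOuter_rel cs lcp hl k (by omega) (a.set k 1) b hset

theorem core_eq (cs : List Char) (h : cs ≠ []) : deleteStringCore cs = deleteStringAltCore cs := by
  have hn : 1 ≤ cs.length := List.length_pos_of_ne_nil h
  simp only [deleteStringCore, deleteStringAltCore]
  have hl : LcpInv cs 0
      ((PySem.List.pyRange ((cs.length : Int) - 1) (-1) (-1)).foldl (lcpOuterA cs)
        (List.replicate (cs.length + 1) (List.replicate (cs.length + 1) (0 : Int)))) :=
    lcpOuter_fold cs cs.length (le_refl _) _ (LcpInv_init cs)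
  set lcp := (PySem.List.pyRange ((cs.length : Int) - 1) (-1) (-1)).foldl (lcpOuterA cs)
      (List.replicate (cs.length + 1) (List.replicate (cs.length + 1) (0 : Int))) with hlcp
  -- peel A's first outer iteration (i = n-1): its inner range is empty, it only sets dp[n-1] = 1
  rw [show ((cs.length : Int) - 1) = (((cs.length - 1 : Nat)) : Int) by omega]
  rw [PySem.List.pyRange_neg_one_cons (by omega)]
  simp only [List.foldl_cons]
  have hfirst : dpOuterA cs lcp (List.replicate cs.length (0 : Int)) (((cs.length - 1 : Nat)) : Int) =
      (List.replicate cs.length (0 : Int)).set (cs.length - 1) 1 := by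
    unfold dpOuterA
    rw [show ((cs.length : Int) - (((cs.length - 1 : Nat)) : Int)) = 1 by omega]
    rw [show PySem.Int.floordiv 1 2 + 1 = 1 by decide]
    rw [PySem.List.pyRange_one_eq_nil (le_refl _)]
    simp
  rw [hfirst]
  have hrel : DpRel cs.length (cs.length - 1)
      ((List.replicate cs.length (0 : Int)).set (cs.length - 1) 1)
      (List.replicate cs.length (1 : Int)) := by
    refine ⟨by simp, by simp, ?_, ?_⟩
    · intro t ht
      by_cases htn : t < cs.length
      · have htk : t = cs.length - 1 := by omega
        subst htk
        rw [getD_set_self _ _ _ _ (by simp; omega), List.getD_replicate _ (by omega)]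
      · rw [List.getD_eq_default _ _ (by simp; omega), List.getD_eq_default _ _ (by simp; omega)]
    · intro t ht
      rw [getD_set_ne _ _ _ _ _ (by omega)]
      constructor
      · exact List.getD_replicate _ (by omega)
      · exact List.getD_replicate _ (by omega)
  have hfin := dpPar_fold cs lcp hl (cs.length - 1) (by omega) _ _ hrel
  rw [show ((cs.length : Int) - 2) = (((cs.length - 1 : Nat)) : Int) - 1 by omega]
  obtain ⟨-, -, hagree, -⟩ := hfin
  exact hagree 0 (Nat.zero_le _)

-- ===== VERDICT (by name: the statement is the Claim_ definition above) =====
theorem deleteString_spec : Claim_equal_deleteString := by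
  intro s _ hpre
  show deleteString s = deleteString_alt s
  unfold deleteString deleteString_alt
  exact core_eq s.toList hpre
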